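-- pv_equiv track=rewrite | github.com/Nguyen-Thi-Thanh-Hoai/CSLT | CHAPTER 7/vd.slide.29.py | kiemtra_ho_ten
-- ===== SOURCE A (Python) =====
-- def kiemtra_ho_ten(ho_ten):
--     for i in range(len(ho_ten)):
--         if i == 0 or ho_ten[i-1] == " ":
--             if not ho_ten[i].istitle():
--                 return False
--         else:
--             if ho_ten[i].istitle():
--                 return False
--     return True
-- ===== SOURCE B (Python) =====
-- def kiemtra_ho_ten(ho_ten):
--     parts = ho_ten.split(' ')
--     for k, part in enumerate(parts):
--         if part == '':
--             if k != len(parts) - 1: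
--                 return False
--         else:
--             if not part[0].istitle():
--                 return False
--             if any(c.istitle() for c in part[1:]):
--                 return False
--     return True
-- ===== Notes on version B (the rewrite author's own statement) =====
-- stated objective: alternative
-- what changed: B splits the name into space-separated words and validates each word (first char title-case, rest not, an empty word allowed only in last position) instead of A's flat index scan that classifies every character by whether its predecessor is a space.
import Mathlib
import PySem

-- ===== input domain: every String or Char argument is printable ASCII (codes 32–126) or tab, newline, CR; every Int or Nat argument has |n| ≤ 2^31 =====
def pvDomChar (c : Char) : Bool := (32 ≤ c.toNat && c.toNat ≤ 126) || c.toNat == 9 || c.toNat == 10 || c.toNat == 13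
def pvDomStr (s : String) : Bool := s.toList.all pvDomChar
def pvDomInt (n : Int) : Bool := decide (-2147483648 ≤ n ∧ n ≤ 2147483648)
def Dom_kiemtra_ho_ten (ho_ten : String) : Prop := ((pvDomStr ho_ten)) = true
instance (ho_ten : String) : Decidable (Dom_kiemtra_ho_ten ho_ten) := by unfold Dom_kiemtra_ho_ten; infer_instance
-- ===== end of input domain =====

-- B validates the name word by word after splitting on ' ' instead of A's flat
-- character scan; same complexity, a different decomposition (objective: alternative).

-- shared primitive: Python's single-character str.istitle(); on the ASCII domain it is
-- exactly "c is an uppercase letter" (exact on Dom_kiemtra_ho_ten's character set)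
def pvIstitle (c : Char) : Bool := PySem.Chars.isupper c

-- ===== PORT A =====
-- the for-i-in-range loop with early returns, as index recursion; s.getD (i-1) ' '
-- is only reached when i ≠ 0 (short-circuit ||), where it equals Python's ho_ten[i-1]
def kiemtraGo (s : List Char) (i : Nat) : Bool :=
  if h : i < s.length then
    if i == 0 || s.getD (i-1) ' ' == ' ' then
      if !pvIstitle s[i] then false else kiemtraGo s (i+1)
    else
      if pvIstitle s[i] then false else kiemtraGo s (i+1)
  else true
termination_by s.length - i

def kiemtra_ho_ten (ho_ten : String) : Bool := kiemtraGo ho_ten.toList 0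

-- ===== PORT B =====
-- part[0].istitle() and "no c in part[1:] is istitle", for a non-empty part
def pvPartOk : List Char → Bool
  | [] => false
  | c :: cs => pvIstitle c && cs.all (fun d => !pvIstitle d)

-- the for-k,part loop of Source B: an empty part is accepted only as the last part
def kiemtraAltGo : List (List Char) → Bool
  | [] => true
  | [p] => if p = [] then true else pvPartOk p
  | p :: rest@(_ :: _) => if p = [] then false else pvPartOk p && kiemtraAltGo rest

-- ho_ten.split(' ') (single-char separator, empties kept) = List.splitOn ' '
def kiemtra_ho_ten_alt (ho_ten : String) : Bool :=
  kiemtraAltGo (ho_ten.toList.splitOn ' ')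

-- ===== PRECONDITION & SPEC =====
def Spec_kiemtra_ho_ten (ho_ten : String) (out : Bool) : Prop := out = kiemtra_ho_ten_alt ho_ten
instance (ho_ten : String) (out : Bool) : Decidable (Spec_kiemtra_ho_ten ho_ten out) := by unfold Spec_kiemtra_ho_ten; infer_instance

-- ===== CLAIM (what is proved, stated in full; the proofs are below) =====
def Claim_equal_kiemtra_ho_ten : Prop := ∀ (ho_ten : String), Dom_kiemtra_ho_ten ho_ten → Spec_kiemtra_ho_ten ho_ten (kiemtra_ho_ten ho_ten)

-- ===== LEMMAS AND PROOFS =====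

-- A's scan, rephrased on the suffix with one boolean "at a word start" state
def pvScan : Bool → List Char → Bool
  | _, [] => true
  | st, c :: cs =>
    if st then (if !pvIstitle c then false else pvScan (c == ' ') cs)
    else (if pvIstitle c then false else pvScan (c == ' ') cs)

-- "the remaining parts after the first, if any"
def pvTailGo : List (List Char) → Bool
  | [] => true
  | l@(_ :: _) => kiemtraAltGo l

lemma pvGoA_eq_scan (s : List Char) (i : Nat) (h : i ≤ s.length) :
    kiemtraGo s i = pvScan (i == 0 || s.getD (i-1) ' ' == ' ') (s.drop i) := by
  induction hn : s.length - i generalizing i with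
  | zero =>
    have hi : i = s.length := by omega
    rw [kiemtraGo]
    simp [hi, pvScan]
  | succ n ih =>
    have hlt : i < s.length := by omega
    rw [kiemtraGo, List.drop_eq_getElem_cons hlt]
    have hnext : kiemtraGo s (i+1)
        = pvScan ((i+1) == 0 || s.getD i ' ' == ' ') (s.drop (i+1)) :=
      ih (i+1) (by omega) (by omega)
    have hg : s.getD i ' ' = s[i] := List.getD_eq_getElem s ' ' hlt
    rw [hg] at hnext
    simp only [hlt, dif_pos]
    by_cases hst : (i == 0 || s.getD (i-1) ' ' == ' ') = true <;>
      cases hic : pvIstitle s[i] <;>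
        simp [pvScan, hic, hnext]

lemma pvIstitle_space : pvIstitle ' ' = false := by decide

lemma pvScan_eq_alt (s : List Char) :
    pvScan true s = kiemtraAltGo (s.splitOn ' ') ∧
    pvScan false s = ((s.splitOn ' ').headI.all (fun c => !pvIstitle c)
                      && pvTailGo (s.splitOn ' ').tail) := by
  induction s with
  | nil => simp [pvScan, List.splitOn, List.splitOnP_nil, kiemtraAltGo, pvTailGo]
  | cons c cs ih =>
    obtain ⟨ih1, ih2⟩ := ih
    rcases hq : cs.splitOn ' ' with _ | ⟨q, qs⟩
    · exact absurd (by simpa [List.splitOn] using hq) (List.splitOnP_ne_nil _ cs)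
    · rw [hq] at ih1 ih2
      by_cases hc : c = ' '
      · subst hc
        have hsp : (' ' :: cs).splitOn ' ' = [] :: q :: qs := by
          simp [List.splitOn, List.splitOnP_cons]
          simpa [List.splitOn] using hq
        refine ⟨?_, ?_⟩ <;>
          simp [pvScan, hsp, kiemtraAltGo, pvTailGo, pvIstitle_space, ih1]
      · have hsp : (c :: cs).splitOn ' ' = (c :: q) :: qs := by
          have hq' : List.splitOnP (fun x => x == ' ') cs = q :: qs := by
            simpa [List.splitOn] using hq
          simp [List.splitOn, List.splitOnP_cons, hc, hq']
        have hcs : (c == ' ') = false := by simp [hc]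
        refine ⟨?_, ?_⟩
        · rcases qs with _ | ⟨r, rs⟩ <;>
            cases hic : pvIstitle c <;>
              simp [pvScan, hsp, kiemtraAltGo, pvTailGo, pvPartOk, hic, hcs, ih2]
        · cases hic : pvIstitle c <;>
            simp [pvScan, hsp, hic, hcs, ih2]

-- ===== VERDICT (by name: the statement is the Claim_ definition above) =====
theorem kiemtra_ho_ten_spec : Claim_equal_kiemtra_ho_ten := by
  intro s _
  unfold Spec_kiemtra_ho_ten kiemtra_ho_ten kiemtra_ho_ten_alt
  rw [pvGoA_eq_scan s.toList 0 (Nat.zero_le _)]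
  simpa using (pvScan_eq_alt s.toList).1
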